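-- pv_equiv track=rewrite | github.com/gdh14/gnn_and_att_on_nlp | preprocess/utils.py | _get_doc_windows
-- ===== SOURCE A (Python) =====
-- def _get_doc_windows(doc_words_ls, window_size):
--     doc_windows = []
--
--     for doc_words in doc_words_ls:
--         words = doc_words.split()
--         length = len(words)
--         if length <= window_size:
--             doc_windows.append(words)
--         else:
--             for i in range(length - window_size + 1):
--                 window = words[i: i + window_size]
--                 doc_windows.append(window)
--
--     return doc_windows
-- ===== SOURCE B (Python) =====
-- def _get_doc_windows(doc_words_ls, window_size):
--     doc_windows = []
--     for doc_words in doc_words_ls: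
--         words = doc_words.split()
--         n = len(words) - window_size + 1
--         while n > 1:
--             doc_windows.append(words[:window_size])
--             words = words[1:]
--             n -= 1
--         doc_windows.append(words[:window_size])
--     return doc_windows
-- ===== Notes on version B (the rewrite author's own statement) =====
-- stated objective: alternative
-- what changed: Replaced A's indexed slicing with an if/else short-document guard by a suffix-walking while loop: B repeatedly emits the window_size-prefix of the current word list and drops its head, counted down from len(words)-window_size+1, so no index arithmetic and no branch remain.
import Mathlib
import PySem

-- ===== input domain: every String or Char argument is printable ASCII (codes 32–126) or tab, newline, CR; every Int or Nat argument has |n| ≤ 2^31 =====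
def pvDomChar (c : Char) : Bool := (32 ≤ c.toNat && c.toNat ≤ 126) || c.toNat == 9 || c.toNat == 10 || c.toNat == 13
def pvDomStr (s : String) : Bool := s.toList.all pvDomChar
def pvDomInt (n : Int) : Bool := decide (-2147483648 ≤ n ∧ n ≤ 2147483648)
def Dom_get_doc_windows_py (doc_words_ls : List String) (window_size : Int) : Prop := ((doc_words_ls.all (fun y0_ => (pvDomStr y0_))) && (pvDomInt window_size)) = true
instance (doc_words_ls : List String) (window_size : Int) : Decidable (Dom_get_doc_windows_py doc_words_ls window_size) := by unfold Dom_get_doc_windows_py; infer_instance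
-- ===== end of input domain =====

-- B walks suffixes: it repeatedly emits the window_size-prefix of the remaining word list and
-- drops the head, counted down from len(words)-window_size+1; no index arithmetic, no branch
-- (objective: alternative decomposition of the same cost).

-- ===== PORT A =====
def get_doc_windows_py (doc_words_ls : List String) (window_size : Int) : List (List String) :=
  doc_words_ls.foldl (fun doc_windows doc_words =>
    let words := PySem.Str.split₀ doc_words
    let length : Int := words.length
    if length ≤ window_size then
      doc_windows ++ [words]
    else
      (PySem.List.pyRange 0 (length - window_size + 1) 1).foldl
        (fun doc_windows i =>
          doc_windows ++ [PySem.List.slice words (some i) (some (i + window_size))])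
        doc_windows) []

-- ===== PORT B =====
-- `while n > 1: …` loop of Source B, transcribed with fuel (n-1).toNat = exact number of iterations
def bGo (window_size : Int) : Nat → List String → List (List String) → List (List String)
  | 0, words, acc => acc ++ [PySem.List.slice words none (some window_size)]
  | k+1, words, acc =>
      bGo window_size k (PySem.List.slice words (some 1) none)
        (acc ++ [PySem.List.slice words none (some window_size)])

def get_doc_windows_py_alt (doc_words_ls : List String) (window_size : Int) : List (List String) :=
  doc_words_ls.foldl (fun doc_windows doc_words =>
    let words := PySem.Str.split₀ doc_words
    let n : Int := (words.length : Int) - window_size + 1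
    bGo window_size (n - 1).toNat words doc_windows) []

-- ===== PRECONDITION & SPEC =====
-- Pre_ excludes negative window sizes, a corner outside the task's natural domain: there A's
-- empty-slice arithmetic and B's suffix prefixes are both accidental values nobody would specify.
def Pre_get_doc_windows_py (doc_words_ls : List String) (window_size : Int) : Prop :=
  0 ≤ window_size
instance (doc_words_ls : List String) (window_size : Int) : Decidable (Pre_get_doc_windows_py doc_words_ls window_size) := by unfold Pre_get_doc_windows_py; infer_instance

def pvWitness_get_doc_windows_py : List String × Int := (["a b c", "d e"], 2)

def Spec_get_doc_windows_py (doc_words_ls : List String) (window_size : Int) (out : List (List String)) : Prop := out = get_doc_windows_py_alt doc_words_ls window_size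
instance (doc_words_ls : List String) (window_size : Int) (out : List (List String)) : Decidable (Spec_get_doc_windows_py doc_words_ls window_size out) := by unfold Spec_get_doc_windows_py; infer_instance

-- ===== CLAIM (what is proved, stated in full; the proofs are below) =====
def Claim_equal_get_doc_windows_py : Prop := ∀ (doc_words_ls : List String) (window_size : Int), Dom_get_doc_windows_py doc_words_ls window_size → Pre_get_doc_windows_py doc_words_ls window_size → Spec_get_doc_windows_py doc_words_ls window_size (get_doc_windows_py doc_words_ls window_size)

-- ===== LEMMAS AND PROOFS =====

-- B's fuelled suffix walk produces the k+1 windows (drop i).take w for i = 0..k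
theorem bGo_eq (w : Int) (hw : 0 ≤ w) (k : Nat) (words : List String) (acc : List (List String)) :
    bGo w k words acc
      = acc ++ (List.range (k+1)).map (fun i => (words.drop i).take w.toNat) := by
  induction k generalizing words acc with
  | zero =>
      simp [bGo, PySem.List.slice_to words hw]
  | succ k ih =>
      rw [bGo, ih, PySem.List.slice_from_one, PySem.List.slice_to words hw]
      rw [show k+1+1 = (k+1)+1 from rfl, List.range_succ_eq_map (n := k+1), List.map_cons,
        List.map_map, List.drop_zero, List.append_assoc, List.singleton_append]
      congr 2
      apply List.map_congr_left
      intro i _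
      simp only [Function.comp_apply, Nat.succ_eq_add_one, List.drop_tail]

-- A's step per document equals B's step per document (0 ≤ w)
theorem step_eq (w : Int) (hw : 0 ≤ w) (words : List String) (acc : List (List String)) :
    (if (words.length : Int) ≤ w then acc ++ [words]
     else (PySem.List.pyRange 0 ((words.length : Int) - w + 1) 1).foldl
        (fun a i => a ++ [PySem.List.slice words (some i) (some (i + w))]) acc)
    = bGo w ((words.length : Int) - w + 1 - 1).toNat words acc := by
  rw [bGo_eq w hw]
  by_cases h : (words.length : Int) ≤ w
  · have h0 : ((words.length : Int) - w + 1 - 1).toNat = 0 := by omega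
    rw [if_pos h, h0]
    simp [List.take_of_length_le (by omega : words.length ≤ w.toNat)]
  · rw [if_neg h]
    rw [PySem.List.foldl_append_singleton_eq_map, PySem.List.pyRange_one]
    have hn : (((words.length : Int) - w + 1) - 0).toNat
        = ((words.length : Int) - w + 1 - 1).toNat + 1 := by omega
    rw [hn, List.map_map]
    congr 1
    apply List.map_congr_left
    intro i _
    simp only [Function.comp_apply, zero_add]
    rw [show w = ((w.toNat : Nat) : Int) by omega, Int.toNat_natCast]
    exact PySem.List.slice_natCast_add words i w.toNat

-- the two document-level folds agree step by step
theorem foldl_eq (w : Int) (hw : 0 ≤ w) (ls : List String) (acc : List (List String)) :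
    ls.foldl (fun doc_windows doc_words =>
      let words := PySem.Str.split₀ doc_words
      let length : Int := words.length
      if length ≤ w then doc_windows ++ [words]
      else (PySem.List.pyRange 0 (length - w + 1) 1).foldl
        (fun a i => a ++ [PySem.List.slice words (some i) (some (i + w))]) doc_windows) acc
    = ls.foldl (fun doc_windows doc_words =>
      let words := PySem.Str.split₀ doc_words
      let n : Int := (words.length : Int) - w + 1
      bGo w (n - 1).toNat words doc_windows) acc := by
  induction ls generalizing acc with
  | nil => rfl
  | cons d ds ih =>
      simp only [List.foldl_cons]
      rw [step_eq w hw (PySem.Str.split₀ d) acc]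
      exact ih _

-- ===== VERDICT (by name: the statement is the Claim_ definition above) =====
theorem get_doc_windows_py_spec : Claim_equal_get_doc_windows_py := by
  intro ls w _ hw
  show get_doc_windows_py ls w = get_doc_windows_py_alt ls w
  unfold get_doc_windows_py get_doc_windows_py_alt
  exact foldl_eq w hw ls []
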